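-- pv_equiv track=rewrite | github.com/Andrewnetwork/MathematicalInvestigations | ComputerVision/AutomataSeedlings/V3/graphHelpers.py | annotateWeightedPathVect
-- ===== SOURCE A (Python) =====
-- def annotateWeightedPathVect(path, idArray, nameArray):
--     idDict = dict()
--     newPath = []
--
--     for elm in path:
--         newPath.append(str(elm))
--
--     iCount = 0
--     for elm in idArray:
--         idDict[elm] = nameArray[iCount]
--         iCount+=1
--
--     weightIndex = 1
--     while( weightIndex+1 < len(path) ):
--         newPath[weightIndex] = idDict[path[weightIndex]]
--         weightIndex+=2
--
--     return newPath
-- ===== SOURCE B (Python) =====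
-- def annotateWeightedPathVect(path, idArray, nameArray):
--     names = dict(zip(idArray, nameArray))
--     out = []
--     i = 0
--     while i + 2 < len(path):
--         out.append(str(path[i]))
--         out.append(names[path[i + 1]])
--         i += 2
--     out.extend(map(str, path[i:]))
--     return out
-- ===== Notes on version B (the rewrite author's own statement) =====
-- stated objective: alternative
-- what changed: A makes three sequential passes that mutate: stringify every path element into a list, build the id->name dict with a manual counter, then a stride-2 while loop overwriting every other slot in place; B builds the lookup with dict(zip(idArray, nameArray)) and emits the output directly by consuming path two elements at a time (str(path[i]) then names[path[i+1]]), appending the stringified tail, with no intermediate all-string list and no in-place overwriting.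
import Mathlib
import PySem

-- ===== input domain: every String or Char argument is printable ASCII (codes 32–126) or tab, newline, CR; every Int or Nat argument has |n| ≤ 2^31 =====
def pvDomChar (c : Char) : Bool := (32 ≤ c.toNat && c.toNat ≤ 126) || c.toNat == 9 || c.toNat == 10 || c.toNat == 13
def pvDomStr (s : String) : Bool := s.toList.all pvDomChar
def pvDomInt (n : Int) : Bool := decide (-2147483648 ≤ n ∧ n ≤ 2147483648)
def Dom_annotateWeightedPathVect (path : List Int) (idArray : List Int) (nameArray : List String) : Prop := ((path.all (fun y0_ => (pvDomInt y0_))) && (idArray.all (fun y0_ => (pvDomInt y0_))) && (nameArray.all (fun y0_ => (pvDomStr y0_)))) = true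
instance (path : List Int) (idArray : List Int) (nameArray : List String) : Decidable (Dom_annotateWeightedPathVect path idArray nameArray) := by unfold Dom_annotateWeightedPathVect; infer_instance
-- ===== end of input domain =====

-- B replaces A's three mutating passes (stringify all, counter-driven dict build, stride-2
-- in-place overwrite) by dict(zip(idArray, nameArray)) and a single pair-consuming loop that
-- emits the output directly; objective: alternative decomposition — return values proved equal.

-- ===== PORT A =====
-- while( weightIndex+1 < len(path) ): newPath[weightIndex] = idDict[path[weightIndex]]; weightIndex += 2
-- (KeyError is excluded by Pre_, so idDict lookup is ported with getD "")
def awpWhile (idDict : PySem.Dict Int String) (path : List Int) (newPath : List String) (w : Nat) : List String :=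
  if w + 1 < path.length then
    awpWhile idDict path
      (PySem.List.pySetD newPath (w : Int) (idDict.getD (PySem.List.pyGetD path (w : Int) 0) ""))
      (w + 2)
  else newPath
termination_by path.length - w

def annotateWeightedPathVect (path : List Int) (idArray : List Int) (nameArray : List String) : List String :=
  -- for elm in path: newPath.append(str(elm))
  let newPath := path.foldl (fun acc elm => acc ++ [PySem.Int.toStr elm]) []
  -- for elm in idArray: idDict[elm] = nameArray[iCount]; iCount += 1   (IndexError excluded by Pre_)
  let st := idArray.foldl
    (fun (st : PySem.Dict Int String × Int) elm =>
      (st.1.insert elm (PySem.List.pyGetD nameArray st.2 ""), st.2 + 1))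
    (PySem.Dict.empty, 0)
  awpWhile st.1 path newPath 1

-- ===== PORT B =====
-- while i + 2 < len(path): out.append(str(path[i])); out.append(names[path[i+1]]); i += 2
-- then out.extend(map(str, path[i:]))   (KeyError excluded by Pre_, lookup ported with getD "")
def awpbLoop (names : PySem.Dict Int String) (path : List Int) (out : List String) (i : Nat) : List String :=
  if i + 2 < path.length then
    awpbLoop names path
      (out ++ [PySem.Int.toStr (PySem.List.pyGetD path (i : Int) 0),
               names.getD (PySem.List.pyGetD path ((i : Int) + 1) 0) ""])
      (i + 2)
  else out ++ (path.drop i).map PySem.Int.toStr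
termination_by path.length - i

def annotateWeightedPathVect_alt (path : List Int) (idArray : List Int) (nameArray : List String) : List String :=
  -- names = dict(zip(idArray, nameArray))
  let names := (idArray.zip nameArray).foldl
    (fun (d : PySem.Dict Int String) p => d.insert p.1 p.2) PySem.Dict.empty
  awpbLoop names path [] 0

-- ===== PRECONDITION & SPEC =====
-- Pre_ excludes exactly the inputs where A raises: IndexError when nameArray is shorter than
-- idArray, and KeyError when some odd-index path element (with a successor) is not in idArray.
def Pre_annotateWeightedPathVect (path : List Int) (idArray : List Int) (nameArray : List String) : Prop :=
  idArray.length ≤ nameArray.length ∧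
  ∀ w : Nat, w < path.length → (w % 2 = 1 ∧ w + 1 < path.length → path.getD w 0 ∈ idArray)
instance (path : List Int) (idArray : List Int) (nameArray : List String) : Decidable (Pre_annotateWeightedPathVect path idArray nameArray) := by unfold Pre_annotateWeightedPathVect; infer_instance

def pvWitness_annotateWeightedPathVect : List Int × List Int × List String := ([10, 20, 30], [20], ["b"])

def Spec_annotateWeightedPathVect (path : List Int) (idArray : List Int) (nameArray : List String) (out : List String) : Prop := out = annotateWeightedPathVect_alt path idArray nameArray
instance (path : List Int) (idArray : List Int) (nameArray : List String) (out : List String) : Decidable (Spec_annotateWeightedPathVect path idArray nameArray out) := by unfold Spec_annotateWeightedPathVect; infer_instance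

-- ===== CLAIM (what is proved, stated in full; the proofs are below) =====
def Claim_equal_annotateWeightedPathVect : Prop := ∀ (path : List Int) (idArray : List Int) (nameArray : List String), Dom_annotateWeightedPathVect path idArray nameArray → Pre_annotateWeightedPathVect path idArray nameArray → Spec_annotateWeightedPathVect path idArray nameArray (annotateWeightedPathVect path idArray nameArray)

-- ===== LEMMAS AND PROOFS =====

-- A's counter-driven dict loop builds the same dict as B's dict(zip ...) when nameArray is long enough.
theorem awp_dict_zip_eq (ids : List Int) (names : List String) (j : Nat) (d : PySem.Dict Int String)
    (h : j + ids.length ≤ names.length) :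
    (ids.foldl (fun (st : PySem.Dict Int String × Int) elm =>
        (st.1.insert elm (PySem.List.pyGetD names st.2 ""), st.2 + 1)) (d, (j : Int))).1
    = (ids.zip (names.drop j)).foldl (fun d p => d.insert p.1 p.2) d := by
  induction ids generalizing j d with
  | nil => simp
  | cons x xs ih =>
    have hj : j < names.length := by simp at h; omega
    rw [List.drop_eq_getElem_cons hj]
    simp only [List.foldl_cons, List.zip_cons_cons]
    have h1 : ((j : Int) + 1) = ((j + 1 : Nat) : Int) := by push_cast; ring
    have h2 : PySem.List.pyGetD names (j : Int) "" = names[j] := by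
      simp [List.getD_eq_getElem?_getD, List.getElem?_eq_getElem hj]
    rw [h1, h2, ih (j + 1) _ (by simp at h ⊢; omega)]

-- element-wise characterisation of A's while loop
theorem awpWhile_getElem? (idDict : PySem.Dict Int String) (path : List Int) (newPath : List String) (w : Nat)
    (hlen : newPath.length = path.length) (j : Nat) :
    (awpWhile idDict path newPath w)[j]?
      = if w ≤ j ∧ (j - w) % 2 = 0 ∧ j + 1 < path.length
        then some (idDict.getD (path.getD j 0) "")
        else newPath[j]? := by
  induction newPath, w using awpWhile.induct idDict path with
  | case1 newPath w h ih =>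
    rw [awpWhile, if_pos h]
    have hw : w < newPath.length := by omega
    rw [ih (by simpa using hlen)]
    by_cases hc : w + 2 ≤ j ∧ (j - (w + 2)) % 2 = 0 ∧ j + 1 < path.length
    · rw [if_pos hc, if_pos (by omega)]
    · rw [if_neg hc]
      by_cases hj : w ≤ j ∧ (j - w) % 2 = 0 ∧ j + 1 < path.length
      · have hjw : j = w := by omega
        subst hjw
        rw [if_pos hj]
        simp [hw, List.getD, PySem.List.pyGet?_ofNat (by omega : w < path.length)]
      · rw [if_neg hj]
        simp [List.getElem?_set]
        intro hjw; omega
  | case2 newPath w h =>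
    rw [awpWhile, if_neg h, if_neg (by omega)]

-- element-wise characterisation of B's pair-consuming loop
theorem awpbLoop_getElem? (names : PySem.Dict Int String) (path : List Int) (out : List String) (i : Nat)
    (hlen : out.length = i) (hpar : i % 2 = 0) (j : Nat) :
    (awpbLoop names path out i)[j]? =
      if j < i then out[j]?
      else if j < path.length then
        some (if j % 2 = 1 ∧ j + 1 < path.length then names.getD (path.getD j 0) ""
              else PySem.Int.toStr (path.getD j 0))
      else none := by
  induction out, i using awpbLoop.induct names path with
  | case1 out i h ih =>
    rw [awpbLoop, if_pos h]
    rw [ih (by simp [hlen]) (by omega)]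
    have hi : ((i : Int) + 1) = ((i + 1 : Nat) : Int) := by push_cast; ring
    have g1 : PySem.List.pyGetD path (i : Int) 0 = path.getD i 0 := by simp
    have g2 : PySem.List.pyGetD path ((i : Int) + 1) 0 = path.getD (i + 1) 0 := by
      rw [hi, PySem.List.pyGetD_natCast]
    by_cases hj : j < i
    · rw [if_pos (by omega), if_pos hj, List.getElem?_append_left (by omega)]
    · by_cases hj1 : j = i
      · subst hj1
        rw [if_pos (by omega), if_neg hj, if_pos (by omega)]
        have : out.length ≤ j := by omega
        rw [List.getElem?_append_right this, hlen]
        simp [g1, if_neg (by omega : ¬ (j % 2 = 1 ∧ j + 1 < path.length))]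
      · by_cases hj2 : j = i + 1
        · subst hj2
          rw [if_pos (by omega), if_neg hj, if_pos (by omega)]
          rw [List.getElem?_append_right (by omega), hlen]
          simp [g2, if_pos (by constructor <;> omega : (i + 1) % 2 = 1 ∧ (i + 1) + 1 < path.length)]
        · rw [if_neg (by omega), if_neg hj]
    | case2 out i h =>
      rw [awpbLoop, if_neg h]
      by_cases hj : j < i
      · rw [if_pos hj, List.getElem?_append_left (by omega)]
      · rw [if_neg hj, List.getElem?_append_right (by omega), hlen]
        by_cases hjl : j < path.length
        · rw [if_pos hjl]
          have hij : i + (j - i) = j := by omega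
          have hdrop : ((path.drop i).map PySem.Int.toStr)[j - i]? = some (PySem.Int.toStr path[j]) := by
            rw [List.getElem?_map, List.getElem?_drop, hij, List.getElem?_eq_getElem hjl]
            simp
          rw [hdrop]
          have hnot : ¬ (j % 2 = 1 ∧ j + 1 < path.length) := by
            intro ⟨h1, h2⟩
            omega
          rw [if_neg hnot]
          rw [List.getD_eq_getElem path 0 hjl]
        · rw [if_neg hjl]
          rw [List.getElem?_eq_none]
          simp
          omega

theorem annotateWeightedPathVect_eq (path : List Int) (idArray : List Int) (nameArray : List String)
    (hpre : idArray.length ≤ nameArray.length) :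
    annotateWeightedPathVect path idArray nameArray = annotateWeightedPathVect_alt path idArray nameArray := by
  simp only [annotateWeightedPathVect, annotateWeightedPathVect_alt]
  have hz : ((0 : Int)) = ((0 : Nat) : Int) := by norm_num
  rw [hz, awp_dict_zip_eq idArray nameArray 0 PySem.Dict.empty (by omega), List.drop_zero]
  rw [PySem.List.foldl_append_singleton_eq_map]
  apply List.ext_getElem?
  intro j
  rw [awpWhile_getElem? _ _ _ _ (by simp) j]
  rw [awpbLoop_getElem? _ _ _ _ (by simp) (by omega) j]
  rw [if_neg (by omega : ¬ j < 0)]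
  by_cases hjl : j < path.length
  · rw [if_pos hjl]
    by_cases hc : 1 ≤ j ∧ (j - 1) % 2 = 0 ∧ j + 1 < path.length
    · rw [if_pos hc, if_pos (by omega : j % 2 = 1 ∧ j + 1 < path.length)]
    · rw [if_neg hc, if_neg (by omega : ¬ (j % 2 = 1 ∧ j + 1 < path.length))]
      simp [List.getElem?_map, List.getElem?_eq_getElem hjl]
  · rw [if_neg hjl, if_neg (by omega : ¬ (1 ≤ j ∧ (j - 1) % 2 = 0 ∧ j + 1 < path.length))]
    rw [List.getElem?_eq_none (by simpa using hjl)]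

-- ===== VERDICT (by name: the statement is the Claim_ definition above) =====
theorem annotateWeightedPathVect_spec : Claim_equal_annotateWeightedPathVect := by
  intro path idArray nameArray _ hpre
  unfold Spec_annotateWeightedPathVect
  exact annotateWeightedPathVect_eq path idArray nameArray hpre.1
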